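-- pv_equiv track=rewrite | github.com/sonsukwoo/Data_preprocessing_auto | backend/src/data_preprocessing/workflow.py | _validation_missing_placeholder_metrics
-- ===== SOURCE A (Python) =====
-- def _validation_missing_placeholder_metrics(
--     metrics: dict[str, object],
--     allowed_missing_cols: set[str],
--     placeholder_required: set[str],
--     placeholder_optional: set[str],
-- ) -> list[str]:
--     prefixes: set[str] = set()
--     for k in metrics.keys():
--         ks = str(k)
--         if ks.endswith("_missing"):
--             prefixes.add(ks[: -len("_missing")])
--         elif ks.endswith("_empty"):
--             prefixes.add(ks[: -len("_empty")])
--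
--     missing_placeholder_metrics: list[str] = []
--     for p in prefixes:
--         if p in allowed_missing_cols:
--             continue
--         if p in placeholder_optional:
--             continue
--         if placeholder_required and p not in placeholder_required:
--             continue
--         has_placeholder = any(
--             str(k).startswith(p) and any(tok in str(k).lower() for tok in ("placeholder", "fallback"))
--             for k in metrics.keys()
--         )
--         if not has_placeholder:
--             missing_placeholder_metrics.append(p)
--     return missing_placeholder_metrics
-- ===== SOURCE B (Python) =====
-- def _validation_missing_placeholder_metrics(
--     metrics,
--     allowed_missing_cols,
--     placeholder_required,
--     placeholder_optional,
-- ):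
--     prefixes = set()
--     for k in metrics.keys():
--         ks = str(k)
--         if ks.endswith("_missing"):
--             prefixes.add(ks[: -len("_missing")])
--         elif ks.endswith("_empty"):
--             prefixes.add(ks[: -len("_empty")])
--
--     # one forward scan over the keys builds the coverage index once,
--     # instead of re-scanning every key (and re-lowering it) per prefix
--     covered = set()
--     for k in metrics.keys():
--         ks = str(k)
--         kl = ks.lower()
--         if "placeholder" in kl or "fallback" in kl:
--             for p in prefixes:
--                 if ks.startswith(p):
--                     covered.add(p)
--
--     return [
--         p
--         for p in prefixes
--         if p not in allowed_missing_cols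
--         and p not in placeholder_optional
--         and not (placeholder_required and p not in placeholder_required)
--         and p not in covered
--     ]
-- ===== Notes on version B (the rewrite author's own statement) =====
-- stated objective: alternative
-- what changed: B inverts the key/prefix loop nesting: one forward scan over the metrics keys (lowered once each) builds a 'covered' set of prefixes that have a placeholder/fallback metric, and the final pass over prefixes becomes a plain filter testing membership in that set instead of re-scanning all keys per prefix.
import Mathlib
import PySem

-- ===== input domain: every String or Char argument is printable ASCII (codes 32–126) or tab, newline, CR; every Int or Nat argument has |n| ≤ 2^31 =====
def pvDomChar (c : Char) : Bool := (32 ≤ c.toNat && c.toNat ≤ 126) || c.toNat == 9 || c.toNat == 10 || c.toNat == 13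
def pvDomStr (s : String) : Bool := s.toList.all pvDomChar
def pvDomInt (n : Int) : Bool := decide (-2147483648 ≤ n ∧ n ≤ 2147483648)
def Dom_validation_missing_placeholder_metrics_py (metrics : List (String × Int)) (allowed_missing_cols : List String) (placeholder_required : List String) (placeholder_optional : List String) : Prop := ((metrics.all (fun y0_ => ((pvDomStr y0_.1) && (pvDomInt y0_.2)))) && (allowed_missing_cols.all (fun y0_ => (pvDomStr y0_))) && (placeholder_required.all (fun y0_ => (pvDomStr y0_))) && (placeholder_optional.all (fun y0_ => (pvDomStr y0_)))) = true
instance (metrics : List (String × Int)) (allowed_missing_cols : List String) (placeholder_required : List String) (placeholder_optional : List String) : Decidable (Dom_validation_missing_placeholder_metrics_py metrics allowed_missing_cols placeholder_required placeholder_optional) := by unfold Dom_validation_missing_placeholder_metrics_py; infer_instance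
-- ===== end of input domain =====

-- ===== PORT A =====
def validation_missing_placeholder_metrics_py (metrics : List (String × Int)) (allowed_missing_cols : List String) (placeholder_required : List String) (placeholder_optional : List String) : List String :=
  let prefixes : PySem.Set String :=
    metrics.foldl (fun acc kv =>
      if PySem.Str.endswith kv.1 "_missing" then
        PySem.Set.add acc (PySem.Str.slice kv.1 none (some (-8)))
      else if PySem.Str.endswith kv.1 "_empty" then
        PySem.Set.add acc (PySem.Str.slice kv.1 none (some (-6)))
      else acc) PySem.Set.empty
  prefixes.foldl (fun out p =>
    if PySem.Set.contains allowed_missing_cols p then out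
    else if PySem.Set.contains placeholder_optional p then out
    else if !placeholder_required.isEmpty && !(PySem.Set.contains placeholder_required p) then out
    else if !(metrics.any (fun kv =>
        PySem.Str.startswith kv.1 p &&
        (PySem.Str.isIn "placeholder" (PySem.Str.lower kv.1) ||
         PySem.Str.isIn "fallback" (PySem.Str.lower kv.1)))) then out ++ [p]
    else out) []

-- ===== PORT B =====
-- B: one scan over the keys builds the 'covered' index; the final pass is a plain filter (alternative decomposition).
def validation_missing_placeholder_metrics_py_alt (metrics : List (String × Int)) (allowed_missing_cols : List String) (placeholder_required : List String) (placeholder_optional : List String) : List String :=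
  let prefixes : PySem.Set String :=
    metrics.foldl (fun acc kv =>
      if PySem.Str.endswith kv.1 "_missing" then
        PySem.Set.add acc (PySem.Str.slice kv.1 none (some (-8)))
      else if PySem.Str.endswith kv.1 "_empty" then
        PySem.Set.add acc (PySem.Str.slice kv.1 none (some (-6)))
      else acc) PySem.Set.empty
  let covered : PySem.Set String :=
    metrics.foldl (fun cov kv =>
      if PySem.Str.isIn "placeholder" (PySem.Str.lower kv.1) ||
         PySem.Str.isIn "fallback" (PySem.Str.lower kv.1) then
        prefixes.foldl (fun cov2 p =>
          if PySem.Str.startswith kv.1 p then PySem.Set.add cov2 p else cov2) cov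
      else cov) PySem.Set.empty
  prefixes.filter (fun p =>
    !(PySem.Set.contains allowed_missing_cols p) &&
    !(PySem.Set.contains placeholder_optional p) &&
    !(!placeholder_required.isEmpty && !(PySem.Set.contains placeholder_required p)) &&
    !(PySem.Set.contains covered p))

-- ===== PRECONDITION & SPEC =====
def Spec_validation_missing_placeholder_metrics_py (metrics : List (String × Int)) (allowed_missing_cols : List String) (placeholder_required : List String) (placeholder_optional : List String) (out : List String) : Prop := out = validation_missing_placeholder_metrics_py_alt metrics allowed_missing_cols placeholder_required placeholder_optional
instance (metrics : List (String × Int)) (allowed_missing_cols : List String) (placeholder_required : List String) (placeholder_optional : List String) (out : List String) : Decidable (Spec_validation_missing_placeholder_metrics_py metrics allowed_missing_cols placeholder_required placeholder_optional out) := by unfold Spec_validation_missing_placeholder_metrics_py; infer_instance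

-- ===== CLAIM (what is proved, stated in full; the proofs are below) =====
def Claim_equal_validation_missing_placeholder_metrics_py : Prop := ∀ (metrics : List (String × Int)) (allowed_missing_cols : List String) (placeholder_required : List String) (placeholder_optional : List String), Dom_validation_missing_placeholder_metrics_py metrics allowed_missing_cols placeholder_required placeholder_optional → Spec_validation_missing_placeholder_metrics_py metrics allowed_missing_cols placeholder_required placeholder_optional (validation_missing_placeholder_metrics_py metrics allowed_missing_cols placeholder_required placeholder_optional)

-- ===== LEMMAS AND PROOFS =====

-- membership in the inner fold of B's covered-building scan
theorem pv_mem_inner (k : String) (l : List String) (cov : List String) (p : String) :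
    p ∈ l.foldl (fun c q => if PySem.Str.startswith k q then PySem.Set.add c q else c) cov ↔
      p ∈ cov ∨ (p ∈ l ∧ PySem.Str.startswith k p = true) := by
  induction l generalizing cov with
  | nil => simp
  | cons h t ih =>
    simp only [List.foldl_cons]
    by_cases hs : PySem.Str.startswith k h = true
    · rw [if_pos hs, ih]
      simp only [PySem.Set.mem_add, List.mem_cons]
      constructor
      · rintro (⟨hc | rfl⟩ | ⟨ht, hp⟩)
        · exact Or.inl hc
        · exact Or.inr ⟨Or.inl rfl, hs⟩
        · exact Or.inr ⟨Or.inr ht, hp⟩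
      · rintro (hc | ⟨(rfl | ht), hp⟩)
        · exact Or.inl (Or.inl hc)
        · exact Or.inl (Or.inr rfl)
        · exact Or.inr ⟨ht, hp⟩
    · rw [if_neg hs, ih]
      simp only [List.mem_cons]
      constructor
      · rintro (hc | ⟨ht, hp⟩)
        · exact Or.inl hc
        · exact Or.inr ⟨Or.inr ht, hp⟩
      · rintro (hc | ⟨(rfl | ht), hp⟩)
        · exact Or.inl hc
        · exact absurd hp hs
        · exact Or.inr ⟨ht, hp⟩

-- membership in B's covered set: some key carries a placeholder/fallback token and starts with p
theorem pv_mem_covered (l : List String) (ms : List (String × Int)) (cov : List String) (p : String) :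
    p ∈ ms.foldl (fun cov kv =>
        if PySem.Str.isIn "placeholder" (PySem.Str.lower kv.1) ||
           PySem.Str.isIn "fallback" (PySem.Str.lower kv.1) then
          l.foldl (fun cov2 q =>
            if PySem.Str.startswith kv.1 q then PySem.Set.add cov2 q else cov2) cov
        else cov) cov ↔
      p ∈ cov ∨ ∃ kv ∈ ms,
        (PySem.Str.isIn "placeholder" (PySem.Str.lower kv.1) ||
         PySem.Str.isIn "fallback" (PySem.Str.lower kv.1)) = true ∧
        p ∈ l ∧ PySem.Str.startswith kv.1 p = true := by
  induction ms generalizing cov with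
  | nil => simp
  | cons h t ih =>
    simp only [List.foldl_cons, List.mem_cons]
    by_cases htok : (PySem.Str.isIn "placeholder" (PySem.Str.lower h.1) ||
        PySem.Str.isIn "fallback" (PySem.Str.lower h.1)) = true
    · rw [if_pos htok, ih, pv_mem_inner]
      constructor
      · rintro (⟨hc | ⟨hl, hs⟩⟩ | ⟨kv, hkv, hx⟩)
        · exact Or.inl hc
        · exact Or.inr ⟨h, Or.inl rfl, htok, hl, hs⟩
        · exact Or.inr ⟨kv, Or.inr hkv, hx⟩
      · rintro (hc | ⟨kv, (rfl | hkv), htk, hl, hs⟩)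
        · exact Or.inl (Or.inl hc)
        · exact Or.inl (Or.inr ⟨hl, hs⟩)
        · exact Or.inr ⟨kv, hkv, htk, hl, hs⟩
    · rw [if_neg htok, ih]
      constructor
      · rintro (hc | ⟨kv, hkv, hx⟩)
        · exact Or.inl hc
        · exact Or.inr ⟨kv, Or.inr hkv, hx⟩
      · rintro (hc | ⟨kv, (rfl | hkv), htk, hx⟩)
        · exact Or.inl hc
        · exact absurd htk htok
        · exact Or.inr ⟨kv, hkv, htk, hx⟩

-- A's append-with-continues loop body is a single guarded append
theorem pv_body_eq (allowed_missing_cols placeholder_required placeholder_optional : List String)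
    (c4 : String → Bool) (out : List String) (p : String) :
    (if PySem.Set.contains allowed_missing_cols p then out
     else if PySem.Set.contains placeholder_optional p then out
     else if !placeholder_required.isEmpty && !(PySem.Set.contains placeholder_required p) then out
     else if !(c4 p) then out ++ [p]
     else out) =
    (if (!(PySem.Set.contains allowed_missing_cols p) &&
         !(PySem.Set.contains placeholder_optional p) &&
         !(!placeholder_required.isEmpty && !(PySem.Set.contains placeholder_required p)) &&
         !(c4 p)) = true then out ++ [p] else out) := by
  cases ha : PySem.Set.contains allowed_missing_cols p <;>
    cases ho : PySem.Set.contains placeholder_optional p <;>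
      cases hr : (!placeholder_required.isEmpty && !(PySem.Set.contains placeholder_required p)) <;>
        cases hc : c4 p <;> simp

-- ===== VERDICT (by name: the statement is the Claim_ definition above) =====
theorem validation_missing_placeholder_metrics_py_spec : Claim_equal_validation_missing_placeholder_metrics_py := by
  intro metrics allowed_missing_cols placeholder_required placeholder_optional _
  unfold Spec_validation_missing_placeholder_metrics_py
  unfold validation_missing_placeholder_metrics_py validation_missing_placeholder_metrics_py_alt
  generalize (metrics.foldl (fun acc kv =>
      if PySem.Str.endswith kv.1 "_missing" then
        PySem.Set.add acc (PySem.Str.slice kv.1 none (some (-8)))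
      else if PySem.Str.endswith kv.1 "_empty" then
        PySem.Set.add acc (PySem.Str.slice kv.1 none (some (-6)))
      else acc) PySem.Set.empty) = l
  rw [funext (fun out => funext (fun p => pv_body_eq allowed_missing_cols placeholder_required placeholder_optional
        (fun p => metrics.any (fun kv =>
          PySem.Str.startswith kv.1 p &&
          (PySem.Str.isIn "placeholder" (PySem.Str.lower kv.1) ||
           PySem.Str.isIn "fallback" (PySem.Str.lower kv.1)))) out p))]
  rw [PySem.List.foldl_append_if_eq_filter]
  simp only [List.nil_append]
  apply List.filter_congr
  intro p hp
  congr 1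
  congr 1
  -- remaining: the any-scan equals membership in covered
  have hcov : (PySem.Set.contains
      (metrics.foldl (fun cov kv =>
        if PySem.Str.isIn "placeholder" (PySem.Str.lower kv.1) ||
           PySem.Str.isIn "fallback" (PySem.Str.lower kv.1) then
          l.foldl (fun cov2 q =>
            if PySem.Str.startswith kv.1 q then PySem.Set.add cov2 q else cov2) cov
        else cov) PySem.Set.empty) p) =
      metrics.any (fun kv =>
        PySem.Str.startswith kv.1 p &&
        (PySem.Str.isIn "placeholder" (PySem.Str.lower kv.1) ||
         PySem.Str.isIn "fallback" (PySem.Str.lower kv.1))) := by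
    rw [Bool.eq_iff_iff]
    rw [PySem.Set.contains_iff, pv_mem_covered, List.any_eq_true]
    simp only [PySem.Set.empty, List.not_mem_nil, false_or, Bool.and_eq_true]
    constructor
    · rintro ⟨kv, hkv, htk, _, hs⟩; exact ⟨kv, hkv, hs, htk⟩
    · rintro ⟨kv, hkv, hs, htk⟩; exact ⟨kv, hkv, htk, hp, hs⟩
  rw [hcov]
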